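-- pv_equiv track=rewrite | github.com/DanielaGutierrez38/Sudoku-Solver | Sudoku.py | find_neighbors_helper
-- ===== SOURCE A (Python) =====
-- def find_neighbors_helper(r, c):
--
--   neighbors = set() #Create set for (r, c)'s neighbors
--
--   #Fill out with tuples on the same row
--   for i in range(9):
--       if i != c:
--         neighbors.add((r, i))
--
--   #Fill out with tuples on the same column
--   for i in range(9):
--     if i != r:
--       neighbors.add((i, c))
--
--   #Find starting index for the row of the 3x3 block (r, c) is in by finding int division result, and then multiplying by 3
--   start_row = (r // 3) * 3
--   #Find starting index for the column of the 3x3 block (r, c) is in by finding int division result, and then multiplying by 3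
--   start_column = (c // 3) * 3
--
--   #Iterate through the 3x3 block by starting with the starting row and column found before and stopping 2 blocks after (delimited using variable + 3)
--   for m in range(start_row, start_row + 3):
--     for n in range(start_column, start_column + 3):
--       if (m, n) != (r, c): #Make sure that (r, c) itself is not being added to the neighbors set
--         neighbors.add((m, n)) #Otherwise, add the coordinate to the set
--
--   return neighbors #Return the set with (r, c)'s neighbors
-- ===== SOURCE B (Python) =====
-- def find_neighbors_helper(r, c):
--     # Single flat enumeration: decode candidate k in range(27) arithmetically
--     # (0-8 -> row cell, 9-17 -> column cell, 18-26 -> block cell), dedup via one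
--     # set comprehension, then drop the cell itself.
--     def cell(k):
--         if k < 9:
--             return (r, k)
--         if k < 18:
--             return (k - 9, c)
--         return ((r // 3) * 3 + (k - 18) // 3, (c // 3) * 3 + (k - 18) % 3)
--     return {cell(k) for k in range(27)} - {(r, c)}
-- ===== Notes on version B (the rewrite author's own statement) =====
-- stated objective: alternative
-- what changed: Replaces A's three separate add-loops (row, column, nested block) with one flat loop over 27 candidate indices, each decoded arithmetically into a cell (index ranges map to row/column/block via divmod), deduplicated by a single set comprehension with the cell itself removed once at the end.
import Mathlib
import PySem

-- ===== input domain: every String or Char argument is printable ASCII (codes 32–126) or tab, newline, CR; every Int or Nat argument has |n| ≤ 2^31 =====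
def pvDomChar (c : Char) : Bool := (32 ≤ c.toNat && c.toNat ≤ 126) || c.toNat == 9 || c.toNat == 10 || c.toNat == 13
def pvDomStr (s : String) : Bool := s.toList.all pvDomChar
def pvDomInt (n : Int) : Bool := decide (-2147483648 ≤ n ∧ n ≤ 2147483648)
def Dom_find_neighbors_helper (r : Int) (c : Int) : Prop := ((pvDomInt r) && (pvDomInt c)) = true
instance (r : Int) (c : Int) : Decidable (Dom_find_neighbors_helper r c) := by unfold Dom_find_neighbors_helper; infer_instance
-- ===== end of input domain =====

-- B replaces A's three separate add-loops by one flat loop over 27 candidate indices, each decoded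
-- arithmetically into a cell, deduplicated once and with the cell itself removed at the end; return value proved identical.

-- ===== PORT A =====
def find_neighbors_helper (r : Int) (c : Int) : List (Int × Int) :=
  let neighbors : PySem.Set (Int × Int) := PySem.Set.empty
  let neighbors := (PySem.List.pyRange 0 9 1).foldl
    (fun s i => if i ≠ c then PySem.Set.add s (r, i) else s) neighbors
  let neighbors := (PySem.List.pyRange 0 9 1).foldl
    (fun s i => if i ≠ r then PySem.Set.add s (i, c) else s) neighbors
  let start_row := PySem.Int.floordiv r 3 * 3
  let start_column := PySem.Int.floordiv c 3 * 3
  let neighbors := (PySem.List.pyRange start_row (start_row + 3) 1).foldl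
    (fun s m => (PySem.List.pyRange start_column (start_column + 3) 1).foldl
      (fun s n => if (m, n) ≠ (r, c) then PySem.Set.add s (m, n) else s) s) neighbors
  neighbors

-- ===== PORT B =====
-- decode candidate index k (0-8 row cell, 9-17 column cell, 18-26 block cell)
def pvCell (r : Int) (c : Int) (k : Int) : Int × Int :=
  if k < 9 then (r, k)
  else if k < 18 then (k - 9, c)
  else (PySem.Int.floordiv r 3 * 3 + PySem.Int.floordiv (k - 18) 3,
        PySem.Int.floordiv c 3 * 3 + PySem.Int.mod (k - 18) 3)

def find_neighbors_helper_alt (r : Int) (c : Int) : List (Int × Int) :=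
  PySem.Set.diff
    (PySem.Set.ofList ((PySem.List.pyRange 0 27 1).map (pvCell r c)))
    (PySem.Set.ofList [(r, c)])

-- ===== PRECONDITION & SPEC =====
def Spec_find_neighbors_helper (r : Int) (c : Int) (out : List (Int × Int)) : Prop := out = find_neighbors_helper_alt r c
instance (r : Int) (c : Int) (out : List (Int × Int)) : Decidable (Spec_find_neighbors_helper r c out) := by unfold Spec_find_neighbors_helper; infer_instance

-- ===== CLAIM (what is proved, stated in full; the proofs are below) =====
def Claim_equal_find_neighbors_helper : Prop := ∀ (r : Int) (c : Int), Dom_find_neighbors_helper r c → Spec_find_neighbors_helper r c (find_neighbors_helper r c)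

-- ===== LEMMAS AND PROOFS =====

def pvR9 : List Int := [0, 1, 2, 3, 4, 5, 6, 7, 8]

def pvRowF (r : Int) : List (Int × Int) := pvR9.map (fun j => (r, j))
def pvColF (c : Int) : List (Int × Int) := pvR9.map (fun i => (i, c))
def pvBlockL (a b : Int) : List (Int × Int) :=
  [(a, b), (a, b + 1), (a, b + 2), (a + 1, b), (a + 1, b + 1), (a + 1, b + 2),
   (a + 2, b), (a + 2, b + 1), (a + 2, b + 2)]
def pvRowA (r c : Int) : List (Int × Int) :=
  (pvR9.filter (fun i => decide (i ≠ c))).map (fun i => (r, i))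
def pvColA (r c : Int) : List (Int × Int) :=
  (pvR9.filter (fun i => decide (i ≠ r))).map (fun i => (i, c))

lemma pv_range9 : PySem.List.pyRange 0 9 1 = pvR9 := by decide

lemma pv_range27 : PySem.List.pyRange 0 27 1 =
    [0, 1, 2, 3, 4, 5, 6, 7, 8, 9, 10, 11, 12, 13, 14, 15, 16, 17, 18, 19, 20,
     21, 22, 23, 24, 25, 26] := by decide

lemma pv_range3 (a : Int) : PySem.List.pyRange a (a + 3) 1 = [a, a + 1, a + 2] := by
  have h2 : a + 1 + 1 = a + 2 := by ring
  rw [PySem.List.pyRange_one_cons (by omega), PySem.List.pyRange_one_cons (by omega), h2,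
      PySem.List.pyRange_one_cons (by omega), PySem.List.pyRange_one_eq_nil (by omega)]

lemma pv_nodup_blockL (a b : Int) : (pvBlockL a b).Nodup := by
  simp [pvBlockL, Prod.ext_iff]

lemma pv_nodup_rowF (r : Int) : (pvRowF r).Nodup := by
  refine List.Nodup.map ?_ (by decide)
  intro a b h; simpa using h

lemma pv_nodup_colF (c : Int) : (pvColF c).Nodup := by
  refine List.Nodup.map ?_ (by decide)
  intro a b h; simpa using h

lemma pv_nodup_rowA (r c : Int) : (pvRowA r c).Nodup := by
  refine List.Nodup.map ?_ (List.Nodup.filter _ (by decide))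
  intro a b h; simpa using h

lemma pv_nodup_colA (r c : Int) : (pvColA r c).Nodup := by
  refine List.Nodup.map ?_ (List.Nodup.filter _ (by decide))
  intro a b h; simpa using h

lemma pv_mem_rowF {r : Int} {p : Int × Int} (h : p ∈ pvRowF r) : p.1 = r := by
  simp [pvRowF] at h
  obtain ⟨j, _, hj⟩ := h
  simp [← hj]

lemma pv_mem_colF {c : Int} {p : Int × Int} (h : p ∈ pvColF c) : p.2 = c := by
  simp [pvColF] at h
  obtain ⟨i, _, hi⟩ := h
  simp [← hi]

-- the row part of both results: all (r, j), j ∈ 0..8, except (r, c)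
lemma pv_rowA (r c : Int) :
    (pvRowF r).filter (fun p => decide (p ≠ (r, c))) = pvRowA r c := by
  simp only [pvRowF, pvRowA, List.filter_map]
  congr 1
  apply List.filter_congr
  intro i _
  simp [Function.comp, Prod.ext_iff]

lemma pv_mem_rowA_iff {r c : Int} {p : Int × Int} :
    p ∈ pvRowA r c ↔ p ∈ pvRowF r ∧ p ≠ (r, c) := by
  rw [← pv_rowA]
  simp

-- the column part: all (i, c), i ∈ 0..8, except (r, c)
lemma pv_colA (r c : Int) :
    (pvColF c).filter (fun p => decide (p ≠ (r, c))) = pvColA r c := by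
  simp only [pvColF, pvColA, List.filter_map]
  congr 1
  apply List.filter_congr
  intro i _
  simp [Function.comp, Prod.ext_iff]

lemma pv_mem_colA_iff {r c : Int} {p : Int × Int} :
    p ∈ pvColA r c ↔ p ∈ pvColF c ∧ p ≠ (r, c) := by
  rw [← pv_colA]
  simp

lemma pv_colA_disjoint_rowA (r c : Int) : ∀ x ∈ pvColA r c, x ∉ pvRowA r c := by
  intro x hx hx2
  have h1 := pv_mem_colA_iff.mp hx
  have h2 := pv_mem_rowA_iff.mp hx2
  have hcr := pv_mem_colF h1.1
  have hrr := pv_mem_rowF h2.1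
  exact h1.2 (by rw [Prod.ext_iff]; exact ⟨hrr, hcr⟩)

-- A's value in normal form: row part, then column part, then the new block cells
lemma pv_A_eq (r c : Int) :
    find_neighbors_helper r c =
      pvRowA r c ++ pvColA r c ++
        ((pvBlockL (PySem.Int.floordiv r 3 * 3) (PySem.Int.floordiv c 3 * 3)).filter
            (fun p => decide (p ≠ (r, c)))).filter
          (fun p => !(PySem.Set.contains (pvRowA r c ++ pvColA r c) p)) := by
  have h1 : List.foldl (fun (s : PySem.Set (Int × Int)) i => if i ≠ c then PySem.Set.add s (r, i) else s)
      PySem.Set.empty pvR9 = pvRowA r c := by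
    rw [PySem.List.foldl_ite_eq_foldl_filter,
        ← PySem.Set.update_map_eq_foldl_add (f := fun i => ((r, i) : Int × Int)),
        show PySem.Set.empty = ([] : List (Int × Int)) from rfl, PySem.Set.update_nil_left]
    exact PySem.Set.ofList_eq_self_of_nodup _ (pv_nodup_rowA r c)
  have h2 : List.foldl (fun (s : PySem.Set (Int × Int)) i => if i ≠ r then PySem.Set.add s (i, c) else s)
      (pvRowA r c) pvR9 = pvRowA r c ++ pvColA r c := by
    rw [PySem.List.foldl_ite_eq_foldl_filter,
        ← PySem.Set.update_map_eq_foldl_add (f := fun i => ((i, c) : Int × Int))]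
    exact PySem.Set.update_eq_append_of_disjoint _ _ (pv_nodup_colA r c) (pv_colA_disjoint_rowA r c)
  have hupd : ∀ (s : PySem.Set (Int × Int)) (xs : List (Int × Int)),
      List.foldl (fun (s : PySem.Set (Int × Int)) p => PySem.Set.add s p) s xs = PySem.Set.update s xs :=
    fun _ _ => rfl
  unfold find_neighbors_helper
  simp only [pv_range9, pv_range3]
  rw [h1, h2]
  have hnest : ∀ s : PySem.Set (Int × Int),
      List.foldl (fun s m => List.foldl
          (fun s n => if (m, n) ≠ (r, c) then PySem.Set.add s (m, n) else s) s
          [PySem.Int.floordiv c 3 * 3, PySem.Int.floordiv c 3 * 3 + 1, PySem.Int.floordiv c 3 * 3 + 2]) s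
        [PySem.Int.floordiv r 3 * 3, PySem.Int.floordiv r 3 * 3 + 1, PySem.Int.floordiv r 3 * 3 + 2] =
      List.foldl (fun s p => if p ≠ (r, c) then PySem.Set.add s p else s) s
        (pvBlockL (PySem.Int.floordiv r 3 * 3) (PySem.Int.floordiv c 3 * 3)) := by
    intro s
    rfl
  rw [hnest, PySem.List.foldl_ite_eq_foldl_filter, hupd, PySem.Set.update_eq_append_filter,
      PySem.Set.ofList_eq_self_of_nodup _ (List.Nodup.filter _ (pv_nodup_blockL _ _))]

-- B's candidate list, decoded: row cells, then column cells, then block cells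
lemma pv_cand (r c : Int) :
    (PySem.List.pyRange 0 27 1).map (pvCell r c) =
      pvRowF r ++ pvColF c ++
        pvBlockL (PySem.Int.floordiv r 3 * 3) (PySem.Int.floordiv c 3 * 3) := by
  rw [pv_range27]
  simp only [List.map]
  norm_num [pvCell, pvRowF, pvColF, pvBlockL, pvR9, PySem.Int.floordiv, PySem.Int.mod]
  refine ⟨⟨by decide, by decide⟩, ⟨by decide, by decide⟩, ⟨by decide, by decide⟩,
    ⟨by decide, by decide⟩, ⟨by decide, by decide⟩, ⟨by decide, by decide⟩, by decide, by decide⟩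

-- B's value in normal form: (row ++ new column cells ++ new block cells) minus (r, c)
lemma pv_B_eq (r c : Int) :
    find_neighbors_helper_alt r c =
      (pvRowF r ++ (pvColF c).filter (fun p => !(PySem.Set.contains (pvRowF r) p)) ++
        (pvBlockL (PySem.Int.floordiv r 3 * 3) (PySem.Int.floordiv c 3 * 3)).filter
          (fun p => !(PySem.Set.contains
            (pvRowF r ++ (pvColF c).filter (fun x => !(PySem.Set.contains (pvRowF r) x))) p))).filter
        (fun p => decide (p ≠ (r, c))) := by
  unfold find_neighbors_helper_alt
  rw [pv_cand, PySem.Set.ofList_append, PySem.Set.ofList_append,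
      PySem.Set.ofList_eq_self_of_nodup _ (pv_nodup_rowF r),
      PySem.Set.update_eq_append_filter, PySem.Set.update_eq_append_filter,
      PySem.Set.ofList_eq_self_of_nodup _ (pv_nodup_colF c),
      PySem.Set.ofList_eq_self_of_nodup _ (pv_nodup_blockL _ _)]
  have hdiff : ∀ s t : PySem.Set (Int × Int),
      PySem.Set.diff s t = s.filter (fun x => !(PySem.Set.contains t x)) := fun _ _ => rfl
  rw [hdiff]
  apply List.filter_congr
  intro p _
  rw [show PySem.Set.ofList ([((r, c) : Int × Int)]) = [(r, c)] from
        PySem.Set.ofList_eq_self_of_nodup _ (by simp)]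
  simp [PySem.Set.contains_eq_listContains]

-- ===== VERDICT (by name: the statement is the Claim_ definition above) =====
theorem find_neighbors_helper_spec : Claim_equal_find_neighbors_helper := by
  intro r c _
  show find_neighbors_helper r c = find_neighbors_helper_alt r c
  rw [pv_A_eq, pv_B_eq, List.filter_append, List.filter_append, pv_rowA]
  simp only [List.filter_filter]
  congr 1
  · congr 1
    -- column segment
    rw [← pv_colA r c]
    apply List.filter_congr
    intro p hp
    by_cases hpc : p = (r, c)
    · simp [hpc]
    · have hprc : p.2 = c := pv_mem_colF hp
      have hnr : p.1 ≠ r → p ∉ pvRowF r := fun h hm => h (pv_mem_rowF hm)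
      by_cases hp1 : p.1 = r
      · have : p = (r, c) := by rw [Prod.ext_iff]; exact ⟨hp1, hprc⟩
        exact absurd this hpc
      · simp [hnr hp1, hpc]
  · -- block segment
    apply List.filter_congr
    intro p _
    by_cases hpc : p = (r, c)
    · simp [hpc]
    · have hmem : (p ∈ pvRowA r c ++ pvColA r c) ↔
          p ∈ pvRowF r ++ (pvColF c).filter (fun x => !(PySem.Set.contains (pvRowF r) x)) := by
        simp [pv_mem_rowA_iff, pv_mem_colA_iff, hpc]
        tauto
      simp [hpc, hmem]
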